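-- pv_equiv track=rewrite | github.com/lynntf/GRETO | gamma_ray_tracking/cluster_utils.py | cluster_summary
-- ===== SOURCE A (Python) =====
-- from itertools import combinations
--
-- def invert_clusters(clusters: dict):
--     """Invert the cluster from {cluster index: items} to {items: cluster index}"""
--     p_to_cluster_idx = {}
--     for c, vals in clusters.items():
--         for val in vals:
--             p_to_cluster_idx[val] = c
--     return p_to_cluster_idx
--
-- def cluster_summary(clusters, true_clusters):
--     """
--     Return true positives, true negatives, false positives, false negatives
--     for a clustering compared to the true clustering.
--
--     This is computed for each pair of elements.
--     """
--     inv_clusters = invert_clusters(clusters)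
--     inv_true_clusters = invert_clusters(true_clusters)
--
--     tp = tn = fp = fn = 0
--
--     points = list(inv_true_clusters.keys())
--     for p1, p2 in combinations(points, 2):
--         if inv_true_clusters[p1] == inv_true_clusters[p2]:
--             if inv_clusters[p1] == inv_clusters[p2]:
--                 tp += 1
--             else:
--                 fn += 1
--         else:
--             if inv_clusters[p1] == inv_clusters[p2]:
--                 fp += 1
--             else:
--                 tn += 1
--     return tp, tn, fp, fn
-- ===== SOURCE B (Python) =====
-- def cluster_summary(clusters, true_clusters):
--     """
--     Return true positives, true negatives, false positives, false negatives
--     for a clustering compared to the true clustering (pair counting), via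
--     contingency-table counts instead of looping over all point pairs.
--     """
--     inv_clusters = {v: c for c, vals in clusters.items() for v in vals}
--     inv_true_clusters = {v: c for c, vals in true_clusters.items() for v in vals}
--
--     cell = {}
--     trow = {}
--     prow = {}
--     for p, t in inv_true_clusters.items():
--         c = inv_clusters[p]
--         k = (t, c)
--         cell[k] = cell.get(k, 0) + 1
--         trow[t] = trow.get(t, 0) + 1
--         prow[c] = prow.get(c, 0) + 1
--
--     tp = sum(v * (v - 1) // 2 for v in cell.values())
--     fn = sum(v * (v - 1) // 2 for v in trow.values()) - tp
--     fp = sum(v * (v - 1) // 2 for v in prow.values()) - tp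
--     n = len(inv_true_clusters)
--     tn = n * (n - 1) // 2 - tp - fn - fp
--     return tp, tn, fp, fn
-- ===== Notes on version B (the rewrite author's own statement) =====
-- stated objective: alternative
-- what changed: Replaces the loop over all pairs of points (quadratic in the number of points) with a single pass building contingency-table counters ((true,pred) cells, row and column sizes) and computing tp/tn/fp/fn from sums of C(count,2).
-- outside the precondition, e.g. on cluster_summary({}, {0: [1]}): A returns (0, 0, 0, 0), B raises KeyError
import Mathlib
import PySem

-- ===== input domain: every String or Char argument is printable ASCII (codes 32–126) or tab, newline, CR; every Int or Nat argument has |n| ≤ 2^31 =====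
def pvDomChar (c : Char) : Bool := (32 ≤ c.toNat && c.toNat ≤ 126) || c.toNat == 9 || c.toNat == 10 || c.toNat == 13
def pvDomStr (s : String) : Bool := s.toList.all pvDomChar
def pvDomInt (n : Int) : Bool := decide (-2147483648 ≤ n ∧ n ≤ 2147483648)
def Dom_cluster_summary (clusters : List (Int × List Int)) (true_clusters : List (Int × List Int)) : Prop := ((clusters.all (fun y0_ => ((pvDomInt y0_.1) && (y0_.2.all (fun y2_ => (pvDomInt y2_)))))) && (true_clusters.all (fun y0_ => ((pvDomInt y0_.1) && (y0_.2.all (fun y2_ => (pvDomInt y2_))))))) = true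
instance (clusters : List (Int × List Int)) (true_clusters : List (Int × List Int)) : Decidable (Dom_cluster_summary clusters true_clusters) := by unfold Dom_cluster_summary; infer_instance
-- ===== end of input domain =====

-- B replaces A's loop over all point pairs by one pass building contingency-table counters
-- (cells (true,pred), row and column sizes) and sums of C(count,2); a different algorithm,
-- no speed claimed; the proof is about the return value (no argument is mutated).

-- ===== PORT A =====
-- invert_clusters: {items: cluster index}, iterating the dict {cluster index: items}
def invertA (cl : List (Int × List Int)) : PySem.Dict Int Int :=
  (PySem.Dict.ofList cl).items.foldl
    (fun d cv => cv.2.foldl (fun d v => d.insert v cv.1) d) PySem.Dict.empty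

-- body of A's `for p1, p2 in combinations(points, 2)` loop (lookups total inside Pre_)
def pairStepA (invC invT : PySem.Dict Int Int) (p : Int)
    (a : Int × Int × Int × Int) (q : Int) : Int × Int × Int × Int :=
  if invT.getD p 0 == invT.getD q 0 then
    if invC.getD p 0 == invC.getD q 0 then (a.1 + 1, a.2.1, a.2.2.1, a.2.2.2)
    else (a.1, a.2.1, a.2.2.1, a.2.2.2 + 1)
  else
    if invC.getD p 0 == invC.getD q 0 then (a.1, a.2.1, a.2.2.1 + 1, a.2.2.2)
    else (a.1, a.2.1 + 1, a.2.2.1, a.2.2.2)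

-- combinations(points, 2) as the nested loop "for each p, then for each later q"
def pairLoopA (invC invT : PySem.Dict Int Int) :
    List Int → (Int × Int × Int × Int) → (Int × Int × Int × Int)
  | [], acc => acc
  | p :: rest, acc => pairLoopA invC invT rest (rest.foldl (pairStepA invC invT p) acc)

def cluster_summary (clusters : List (Int × List Int)) (true_clusters : List (Int × List Int)) : Int × Int × Int × Int :=
  let invC := invertA clusters
  let invT := invertA true_clusters
  pairLoopA invC invT invT.keys (0, 0, 0, 0)

-- ===== PORT B =====
-- the dict comprehension {v: c for c, vals in cl.items() for v in vals}
def invertB (cl : List (Int × List Int)) : PySem.Dict Int Int :=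
  (PySem.Dict.ofList cl).items.foldl
    (fun d cv => cv.2.foldl (fun d v => d.insert v cv.1) d) PySem.Dict.empty

-- B's single pass over inv_true_clusters.items(): three `d[x] = d.get(x, 0) + 1` updates
def countLoopB (invC : PySem.Dict Int Int) :
    List (Int × Int) →
      PySem.Dict (Int × Int) Int × PySem.Dict Int Int × PySem.Dict Int Int →
      PySem.Dict (Int × Int) Int × PySem.Dict Int Int × PySem.Dict Int Int
  | [], s => s
  | pt :: rest, s =>
      let c := invC.getD pt.1 0
      countLoopB invC rest
        (s.1.insert (pt.2, c) (s.1.getD (pt.2, c) 0 + 1),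
         s.2.1.insert pt.2 (s.2.1.getD pt.2 0 + 1),
         s.2.2.insert c (s.2.2.getD c 0 + 1))

-- v * (v - 1) // 2
def c2I (k : Int) : Int := PySem.Int.floordiv (k * (k - 1)) 2

def cluster_summary_alt (clusters : List (Int × List Int)) (true_clusters : List (Int × List Int)) : Int × Int × Int × Int :=
  let invC := invertB clusters
  let invT := invertB true_clusters
  let s := countLoopB invC invT.items (PySem.Dict.empty, PySem.Dict.empty, PySem.Dict.empty)
  let tp := (s.1.values.map c2I).sum
  let fn := (s.2.1.values.map c2I).sum - tp
  let fp := (s.2.2.values.map c2I).sum - tp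
  let n : Int := (invT.size : Int)
  let tn := PySem.Int.floordiv (n * (n - 1)) 2 - tp - fn - fp
  (tp, tn, fp, fn)

-- ===== PRECONDITION & SPEC =====
-- Pre_ excludes inputs on which some point of true_clusters does not occur in clusters:
-- there Python A raises KeyError as soon as a pair of points exists (with at most one
-- point it returns (0,0,0,0) because no lookup ever runs), while B's single pass always
-- raises KeyError on such input.
def Pre_cluster_summary (clusters : List (Int × List Int)) (true_clusters : List (Int × List Int)) : Prop :=
  ∀ p ∈ (PySem.Dict.ofList true_clusters).items.flatMap (fun cv => cv.2),
    p ∈ (PySem.Dict.ofList clusters).items.flatMap (fun cv => cv.2)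
instance (clusters : List (Int × List Int)) (true_clusters : List (Int × List Int)) : Decidable (Pre_cluster_summary clusters true_clusters) := by unfold Pre_cluster_summary; infer_instance

def pvWitness_cluster_summary : (List (Int × List Int)) × (List (Int × List Int)) :=
  ([(0, [1, 2]), (1, [3])], [(0, [1, 3]), (2, [2])])

def Spec_cluster_summary (clusters : List (Int × List Int)) (true_clusters : List (Int × List Int)) (out : Int × Int × Int × Int) : Prop := out = cluster_summary_alt clusters true_clusters
instance (clusters : List (Int × List Int)) (true_clusters : List (Int × List Int)) (out : Int × Int × Int × Int) : Decidable (Spec_cluster_summary clusters true_clusters out) := by unfold Spec_cluster_summary; infer_instance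

-- ===== CLAIM (what is proved, stated in full; the proofs are below) =====
def Claim_equal_cluster_summary : Prop := ∀ (clusters : List (Int × List Int)) (true_clusters : List (Int × List Int)), Dom_cluster_summary clusters true_clusters → Pre_cluster_summary clusters true_clusters → Spec_cluster_summary clusters true_clusters (cluster_summary clusters true_clusters)


-- ===== LEMMAS AND PROOFS =====

-- number of (unordered) pairs of equal elements in a list, scanning left to right
def eqPairs {α : Type} [BEq α] : List α → Nat
  | [] => 0
  | x :: rest => rest.count x + eqPairs rest

def c2N (n : Nat) : Nat := n * (n - 1) / 2

-- abstract counting loop (what each component of countLoopB performs on its key stream)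
def bCount {α : Type} [BEq α] (xs : List α) : PySem.Dict α Int :=
  xs.foldl (fun d x => d.insert x (d.getD x 0 + 1)) PySem.Dict.empty

-- the per-point (true-label, predicted-label) pair A classifies by
def g2 (invC invT : PySem.Dict Int Int) (p : Int) : Int × Int :=
  (invT.getD p 0, invC.getD p 0)

def tpN (invC invT : PySem.Dict Int Int) : List Int → Nat
  | [] => 0
  | p :: r => r.countP (fun q => (invT.getD p 0 == invT.getD q 0) && (invC.getD p 0 == invC.getD q 0)) + tpN invC invT r

def tnN (invC invT : PySem.Dict Int Int) : List Int → Nat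
  | [] => 0
  | p :: r => r.countP (fun q => !(invT.getD p 0 == invT.getD q 0) && !(invC.getD p 0 == invC.getD q 0)) + tnN invC invT r

def fpN (invC invT : PySem.Dict Int Int) : List Int → Nat
  | [] => 0
  | p :: r => r.countP (fun q => !(invT.getD p 0 == invT.getD q 0) && (invC.getD p 0 == invC.getD q 0)) + fpN invC invT r

def fnN (invC invT : PySem.Dict Int Int) : List Int → Nat
  | [] => 0
  | p :: r => r.countP (fun q => (invT.getD p 0 == invT.getD q 0) && !(invC.getD p 0 == invC.getD q 0)) + fnN invC invT r

theorem c2N_succ (n : Nat) : c2N (n + 1) = c2N n + n := by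
  unfold c2N
  rcases n with _ | m
  · rfl
  · have h : (m + 1 + 1) * (m + 1) = (m + 1) * m + 2 * (m + 1) := by ring
    simp only [Nat.add_sub_cancel]
    omega

theorem countP_split {α : Type} (p q : α → Bool) (l : List α) :
    l.countP p = l.countP (fun a => p a && q a) + l.countP (fun a => p a && !q a) := by
  induction l with
  | nil => simp
  | cons x xs ih =>
    simp only [List.countP_cons]
    cases hp : p x <;> cases hq : q x <;> simp [hp, hq] <;> omega

theorem countP_not_add {α : Type} (p : α → Bool) (l : List α) :
    l.countP p + l.countP (fun a => !p a) = l.length := by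
  induction l with
  | nil => simp
  | cons x xs ih =>
    simp only [List.countP_cons, List.length_cons]
    cases hp : p x <;> simp [hp] <;> omega

theorem eqPairs_append {α : Type} [BEq α] [LawfulBEq α] (xs : List α) (x : α) :
    eqPairs (xs ++ [x]) = eqPairs xs + xs.count x := by
  induction xs with
  | nil => simp [eqPairs]
  | cons y ys ih =>
    simp only [List.cons_append, eqPairs, ih, List.count_cons, List.count_append]
    have h : (x == y) = (y == x) := BEq.comm
    simp only [h, List.count_nil]
    omega

theorem sumC2_append {α : Type} [BEq α] [LawfulBEq α] (L xs : List α) (x : α)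
    (hnd : L.Nodup) (hx : x ∈ L) :
    (L.map (fun k => c2N ((xs ++ [x]).count k))).sum
      = (L.map (fun k => c2N (xs.count k))).sum + xs.count x := by
  induction L with
  | nil => simp at hx
  | cons y ys ih =>
    simp only [List.map_cons, List.sum_cons]
    rcases List.mem_cons.mp hx with h | h
    · subst h
      have hys : x ∉ ys := (List.nodup_cons.mp hnd).1
      have h1 : (xs ++ [x]).count x = xs.count x + 1 := by
        simp [List.count_append]
      have h2 : (ys.map (fun k => c2N ((xs ++ [x]).count k))) = (ys.map (fun k => c2N (xs.count k))) := by
        apply List.map_congr_left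
        intro k hk
        have : ¬ (x == k) := by simp; rintro rfl; exact hys hk
        simp [List.count_append, List.count_cons, this]
      rw [h1, h2, c2N_succ]
      omega
    · have hyx : y ≠ x := by rintro rfl; exact (List.nodup_cons.mp hnd).1 h
      have h1 : (xs ++ [x]).count y = xs.count y := by
        have : ¬ (x == y) := by simp; exact fun h => hyx h.symm
        simp [List.count_append, List.count_cons, this]
      rw [h1, ih (List.nodup_cons.mp hnd).2 h]
      omega

theorem eqPairs_eq_sumC2 {α : Type} [BEq α] [LawfulBEq α] (L : List α) (hnd : L.Nodup) :
    ∀ xs : List α, (∀ x ∈ xs, x ∈ L) →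
      eqPairs xs = (L.map (fun k => c2N (xs.count k))).sum := by
  intro xs
  induction xs using List.reverseRecOn with
  | nil => intro _; simp [eqPairs, c2N]
  | append_singleton ys x ih =>
    intro hmem
    have hys : ∀ a ∈ ys, a ∈ L := fun a ha => hmem a (List.mem_append_left _ ha)
    have hx : x ∈ L := hmem x (List.mem_append_right _ (List.mem_singleton_self x))
    rw [eqPairs_append, sumC2_append L ys x hnd hx, ih hys]

theorem c2I_cast (n : Nat) : c2I ((n : Nat) : Int) = ((c2N n : Nat) : Int) := by
  unfold c2I
  rcases n with _ | m
  · rfl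
  · have h1 : ((m + 1 : Nat) : Int) - 1 = ((m : Nat) : Int) := by push_cast; ring
    rw [h1]
    have h2 : ((m + 1 : Nat) : Int) * ((m : Nat) : Int) = (((m + 1) * m : Nat) : Int) := by push_cast; ring
    rw [h2]
    have h3 : ((2 : Nat) : Int) = 2 := by norm_num
    rw [← h3, PySem.Int.floordiv_natCast]
    simp [c2N]

theorem bCount_values_sum {α : Type} [BEq α] [LawfulBEq α] (xs : List α) :
    ((bCount xs).values.map c2I).sum = ((eqPairs xs : Nat) : Int) := by
  have hc : bCount xs = PySem.Dict.counter xs := PySem.Dict.foldl_insert_getD_add_one_eq_counter xs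
  rw [hc]
  have hv : (PySem.Dict.counter xs).values = (PySem.Set.ofList xs).map (fun k => ((xs.count k : Nat) : Int)) := by
    simp only [PySem.Dict.values, PySem.Dict.items_counter, List.map_map]
    rfl
  rw [hv, List.map_map]
  have h1 : ((PySem.Set.ofList xs).map (c2I ∘ fun k => ((xs.count k : Nat) : Int))) =
      ((PySem.Set.ofList xs).map (fun k => ((c2N (xs.count k) : Nat) : Int))) := by
    apply List.map_congr_left
    intro k _
    exact c2I_cast (xs.count k)
  rw [h1, eqPairs_eq_sumC2 (PySem.Set.ofList xs) (PySem.Set.nodup_ofList xs) xs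
        (fun x hx => (PySem.Set.mem_ofList xs x).mpr hx)]
  rw [Nat.cast_list_sum, List.map_map]
  rfl

theorem foldl_pairStepA (invC invT : PySem.Dict Int Int) (p : Int) (r : List Int) :
    ∀ acc : Int × Int × Int × Int,
    r.foldl (pairStepA invC invT p) acc =
      (acc.1 + (r.countP (fun q => (invT.getD p 0 == invT.getD q 0) && (invC.getD p 0 == invC.getD q 0)) : Int),
       acc.2.1 + (r.countP (fun q => !(invT.getD p 0 == invT.getD q 0) && !(invC.getD p 0 == invC.getD q 0)) : Int),
       acc.2.2.1 + (r.countP (fun q => !(invT.getD p 0 == invT.getD q 0) && (invC.getD p 0 == invC.getD q 0)) : Int),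
       acc.2.2.2 + (r.countP (fun q => (invT.getD p 0 == invT.getD q 0) && !(invC.getD p 0 == invC.getD q 0)) : Int)) := by
  induction r with
  | nil => intro acc; simp
  | cons q r ih =>
    intro acc
    simp only [List.foldl_cons, ih, List.countP_cons]
    unfold pairStepA
    by_cases h1 : (invT.getD p 0 == invT.getD q 0) = true <;>
      by_cases h2 : (invC.getD p 0 == invC.getD q 0) = true <;>
      simp [h1, h2] <;> push_cast <;> ring_nf

theorem pairLoopA_eq (invC invT : PySem.Dict Int Int) (l : List Int) :
    ∀ acc : Int × Int × Int × Int,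
    pairLoopA invC invT l acc =
      (acc.1 + (tpN invC invT l : Int), acc.2.1 + (tnN invC invT l : Int),
       acc.2.2.1 + (fpN invC invT l : Int), acc.2.2.2 + (fnN invC invT l : Int)) := by
  induction l with
  | nil => intro acc; simp [pairLoopA, tpN, tnN, fpN, fnN]
  | cons p r ih =>
    intro acc
    simp only [pairLoopA, ih, foldl_pairStepA, tpN, tnN, fpN, fnN]
    push_cast
    ring_nf

theorem tpN_eq (invC invT : PySem.Dict Int Int) (l : List Int) :
    tpN invC invT l = eqPairs (l.map (g2 invC invT)) := by
  induction l with
  | nil => rfl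
  | cons p r ih =>
    simp only [tpN, List.map_cons, eqPairs, ih]
    congr 1
    rw [List.count_eq_countP, List.countP_map]
    apply List.countP_congr
    intro q _
    simp only [Function.comp_apply]
    have h1 : (g2 invC invT q == g2 invC invT p)
        = ((invT.getD p 0 == invT.getD q 0) && (invC.getD p 0 == invC.getD q 0)) := by
      have a1 : (invT.getD q 0 == invT.getD p 0) = (invT.getD p 0 == invT.getD q 0) := BEq.comm
      have a2 : (invC.getD q 0 == invC.getD p 0) = (invC.getD p 0 == invC.getD q 0) := BEq.comm
      show ((invT.getD q 0 == invT.getD p 0) && (invC.getD q 0 == invC.getD p 0)) = _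
      rw [a1, a2]
    rw [h1]

theorem count_map_fun (f : Int → Int) (p : Int) (r : List Int) :
    (r.map f).count (f p) = r.countP (fun q => f p == f q) := by
  rw [List.count_eq_countP, List.countP_map]
  apply List.countP_congr
  intro q _
  simp only [Function.comp_apply]
  rw [show (f q == f p) = (f p == f q) from BEq.comm]

theorem tpN_add_fnN (invC invT : PySem.Dict Int Int) (l : List Int) :
    tpN invC invT l + fnN invC invT l = eqPairs (l.map (fun p => invT.getD p 0)) := by
  induction l with
  | nil => rfl
  | cons p r ih =>
    simp only [tpN, fnN, List.map_cons, eqPairs]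
    rw [count_map_fun (fun p => invT.getD p 0) p r]
    have hs := countP_split (fun q => invT.getD p 0 == invT.getD q 0)
        (fun q => invC.getD p 0 == invC.getD q 0) r
    simp only [] at hs
    omega

theorem tpN_add_fpN (invC invT : PySem.Dict Int Int) (l : List Int) :
    tpN invC invT l + fpN invC invT l = eqPairs (l.map (fun p => invC.getD p 0)) := by
  induction l with
  | nil => rfl
  | cons p r ih =>
    simp only [tpN, fpN, List.map_cons, eqPairs]
    rw [count_map_fun (fun p => invC.getD p 0) p r]
    have hs := countP_split (fun q => invC.getD p 0 == invC.getD q 0)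
        (fun q => invT.getD p 0 == invT.getD q 0) r
    have h1 : r.countP (fun q => (invC.getD p 0 == invC.getD q 0) && (invT.getD p 0 == invT.getD q 0))
        = r.countP (fun q => (invT.getD p 0 == invT.getD q 0) && (invC.getD p 0 == invC.getD q 0)) := by
      apply List.countP_congr; intro q _; rw [Bool.and_comm]
    have h2 : r.countP (fun q => (invC.getD p 0 == invC.getD q 0) && !(invT.getD p 0 == invT.getD q 0))
        = r.countP (fun q => !(invT.getD p 0 == invT.getD q 0) && (invC.getD p 0 == invC.getD q 0)) := by
      apply List.countP_congr; intro q _; rw [Bool.and_comm]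
    rw [h1, h2] at hs
    omega

theorem four_sum (invC invT : PySem.Dict Int Int) (l : List Int) :
    tpN invC invT l + tnN invC invT l + fpN invC invT l + fnN invC invT l = c2N l.length := by
  induction l with
  | nil => rfl
  | cons p r ih =>
    simp only [tpN, tnN, fpN, fnN, List.length_cons, c2N_succ]
    have e1 := countP_split (fun q => (invT.getD p 0 == invT.getD q 0))
        (fun q => (invC.getD p 0 == invC.getD q 0)) r
    have e2 := countP_split (fun q => !(invT.getD p 0 == invT.getD q 0))
        (fun q => (invC.getD p 0 == invC.getD q 0)) r
    have e3 := countP_not_add (fun q => (invT.getD p 0 == invT.getD q 0)) r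
    omega

theorem invert_foldl_nodup (l : List (Int × List Int)) :
    ∀ d : PySem.Dict Int Int, d.keys.Nodup →
      (l.foldl (fun d cv => cv.2.foldl (fun d v => d.insert v cv.1) d) d).keys.Nodup := by
  induction l with
  | nil => intro d h; simpa
  | cons cv rest ih =>
    intro d h
    exact ih _ (PySem.Dict.nodup_keys_foldl_insert cv.2 (fun _ _ => cv.1) d h)

theorem invertB_eq_invertA : invertB = invertA := rfl

theorem countLoopB_eq (invC : PySem.Dict Int Int) (l : List (Int × Int)) :
    ∀ s : PySem.Dict (Int × Int) Int × PySem.Dict Int Int × PySem.Dict Int Int,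
      countLoopB invC l s =
        ((l.map (fun pt => (pt.2, invC.getD pt.1 0))).foldl (fun d x => d.insert x (d.getD x 0 + 1)) s.1,
         (l.map (fun pt => pt.2)).foldl (fun d x => d.insert x (d.getD x 0 + 1)) s.2.1,
         (l.map (fun pt => invC.getD pt.1 0)).foldl (fun d x => d.insert x (d.getD x 0 + 1)) s.2.2) := by
  induction l with
  | nil => intro s; rfl
  | cons pt rest ih =>
    intro s
    simp only [countLoopB, ih, List.map_cons, List.foldl_cons]

theorem countLoopB_bCount (invC : PySem.Dict Int Int) (l : List (Int × Int)) :
    countLoopB invC l (PySem.Dict.empty, PySem.Dict.empty, PySem.Dict.empty) =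
      (bCount (l.map (fun pt => (pt.2, invC.getD pt.1 0))),
       bCount (l.map (fun pt => pt.2)),
       bCount (l.map (fun pt => invC.getD pt.1 0))) := by
  rw [countLoopB_eq]
  rfl

theorem invertA_keys_nodup (cl : List (Int × List Int)) : (invertA cl).keys.Nodup := by
  unfold invertA
  exact invert_foldl_nodup _ PySem.Dict.empty (by simp [PySem.Dict.keys_empty])

theorem main_eq (clusters true_clusters : List (Int × List Int)) :
    cluster_summary clusters true_clusters = cluster_summary_alt clusters true_clusters := by
  unfold cluster_summary cluster_summary_alt
  simp only []
  rw [invertB_eq_invertA]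
  set invC := invertA clusters with hC
  set invT := invertA true_clusters with hT
  have hnd : invT.keys.Nodup := invertA_keys_nodup true_clusters
  have hitems : invT.items = invT.keys.map (fun k => (k, invT.getD k 0)) :=
    PySem.Dict.items_eq_map_keys invT hnd 0
  have hlabels : invT.items.map (fun pt => (pt.2, invC.getD pt.1 0))
      = invT.keys.map (g2 invC invT) := by
    rw [hitems, List.map_map]; rfl
  have hfst : invT.items.map (fun pt => pt.2)
      = invT.keys.map (fun p => invT.getD p 0) := by
    rw [hitems, List.map_map]; rfl
  have hsnd : invT.items.map (fun pt => invC.getD pt.1 0)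
      = invT.keys.map (fun p => invC.getD p 0) := by
    rw [hitems, List.map_map]; rfl
  rw [pairLoopA_eq, countLoopB_bCount, hlabels, hfst, hsnd]
  have htp : ((bCount (invT.keys.map (g2 invC invT))).values.map c2I).sum
      = ((tpN invC invT invT.keys : Nat) : Int) := by
    rw [bCount_values_sum, tpN_eq]
  have ht : ((bCount (invT.keys.map (fun p => invT.getD p 0))).values.map c2I).sum
      = ((tpN invC invT invT.keys + fnN invC invT invT.keys : Nat) : Int) := by
    rw [bCount_values_sum, tpN_add_fnN]
  have hp : ((bCount (invT.keys.map (fun p => invC.getD p 0))).values.map c2I).sum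
      = ((tpN invC invT invT.keys + fpN invC invT invT.keys : Nat) : Int) := by
    rw [bCount_values_sum, tpN_add_fpN]
  have hsize : (invT.size : Int) = ((invT.keys.length : Nat) : Int) := by
    have h : invT.size = invT.items.length := rfl
    rw [h, hitems, List.length_map]
  have htn : PySem.Int.floordiv ((invT.size : Int) * ((invT.size : Int) - 1)) 2
      = ((c2N invT.keys.length : Nat) : Int) := by
    rw [hsize]
    exact c2I_cast invT.keys.length
  have h4 := four_sum invC invT invT.keys
  rw [htp, ht, hp, htn]
  simp only [Prod.mk.injEq]
  refine ⟨by omega, by push_cast; omega, by push_cast; omega, by push_cast; omega⟩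

-- ===== VERDICT (by name: the statement is the Claim_ definition above) =====
theorem cluster_summary_spec : Claim_equal_cluster_summary := by
  intro clusters true_clusters _ _
  unfold Spec_cluster_summary
  exact main_eq clusters true_clusters
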